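-- pv_equiv track=rewrite | github.com/NITHISHKUMAR0283/marinex2 | scripts/analyze_netcdf_structure.py | _categorize_variables
-- ===== SOURCE A (Python) =====
-- from typing import Dict, List, Any, Optional
--
-- def _categorize_variables(variables_info: Dict[str, Any]) -> Dict[str, List[str]]:
--     """Categorize variables by their purpose."""
--     categories = {
--         'coordinates': [],
--         'core_parameters': [],
--         'bgc_parameters': [],
--         'quality_flags': [],
--         'metadata': [],
--         'technical': []
--     }
--
--     for var_name, var_info in variables_info.items():
--         if var_name in ['LATITUDE', 'LONGITUDE', 'JULD', 'PRES']:
--             categories['coordinates'].append(var_name)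
--         elif var_name in ['TEMP', 'PSAL', 'CNDC']:
--             categories['core_parameters'].append(var_name)
--         elif var_name in ['DOXY', 'CHLA', 'BBP700', 'PH_IN_SITU_TOTAL', 'NITRATE']:
--             categories['bgc_parameters'].append(var_name)
--         elif '_QC' in var_name or 'FLAG' in var_name:
--             categories['quality_flags'].append(var_name)
--         elif var_name in ['PLATFORM_NUMBER', 'PROJECT_NAME', 'PI_NAME', 'CYCLE_NUMBER']:
--             categories['metadata'].append(var_name)
--         else:
--             categories['technical'].append(var_name)
--
--     return categories
-- ===== SOURCE B (Python) =====
-- _NAME_TO_CAT = {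
--     'LATITUDE': 'coordinates', 'LONGITUDE': 'coordinates', 'JULD': 'coordinates', 'PRES': 'coordinates',
--     'TEMP': 'core_parameters', 'PSAL': 'core_parameters', 'CNDC': 'core_parameters',
--     'DOXY': 'bgc_parameters', 'CHLA': 'bgc_parameters', 'BBP700': 'bgc_parameters',
--     'PH_IN_SITU_TOTAL': 'bgc_parameters', 'NITRATE': 'bgc_parameters',
--     'PLATFORM_NUMBER': 'metadata', 'PROJECT_NAME': 'metadata', 'PI_NAME': 'metadata', 'CYCLE_NUMBER': 'metadata',
-- }
-- _ORDER = ['coordinates', 'core_parameters', 'bgc_parameters', 'quality_flags', 'metadata', 'technical']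
--
-- def _category_of(name):
--     cat = _NAME_TO_CAT.get(name)
--     if cat is not None:
--         return cat
--     return 'quality_flags' if ('_QC' in name or 'FLAG' in name) else 'technical'
--
-- def _categorize_variables(variables_info):
--     names = list(variables_info)
--     return {cat: [n for n in names if _category_of(n) == cat] for cat in _ORDER}
-- ===== Notes on version B (the rewrite author's own statement) =====
-- stated objective: idiomatic
-- what changed: Replaces A's six-way if/elif chain with per-name appends into a pre-seeded dict by a name-to-category lookup table plus group-by: the result is built as a dict comprehension of six filters over the key list, with the _QC/FLAG substring rule as the lookup fallback.
import Mathlib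
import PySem

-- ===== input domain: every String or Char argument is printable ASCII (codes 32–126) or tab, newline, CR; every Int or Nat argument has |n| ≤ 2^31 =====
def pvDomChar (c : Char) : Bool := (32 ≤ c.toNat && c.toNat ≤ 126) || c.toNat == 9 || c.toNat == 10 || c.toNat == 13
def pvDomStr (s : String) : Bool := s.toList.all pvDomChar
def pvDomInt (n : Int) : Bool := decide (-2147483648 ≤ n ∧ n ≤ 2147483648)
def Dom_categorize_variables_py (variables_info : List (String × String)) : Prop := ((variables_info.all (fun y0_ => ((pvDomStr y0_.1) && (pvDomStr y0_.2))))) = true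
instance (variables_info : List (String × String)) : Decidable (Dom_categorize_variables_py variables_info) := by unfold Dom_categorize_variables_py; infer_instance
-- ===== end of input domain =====

-- B groups by six filters over a name→category map instead of A's per-name append loop (idiomatic; same cost class).

-- ===== PORT A =====
def categorize_variables_py (variables_info : List (String × String)) : List (String × List String) :=
  let categories : PySem.Dict String (List String) :=
    (((((PySem.Dict.empty.insert "coordinates" []).insert "core_parameters" []).insert "bgc_parameters" []).insert "quality_flags" []).insert "metadata" []).insert "technical" []
  let categories := variables_info.foldl (fun categories p =>
    let var_name := p.1
    if ["LATITUDE", "LONGITUDE", "JULD", "PRES"].contains var_name then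
      categories.modify "coordinates" [] (· ++ [var_name])
    else if ["TEMP", "PSAL", "CNDC"].contains var_name then
      categories.modify "core_parameters" [] (· ++ [var_name])
    else if ["DOXY", "CHLA", "BBP700", "PH_IN_SITU_TOTAL", "NITRATE"].contains var_name then
      categories.modify "bgc_parameters" [] (· ++ [var_name])
    else if PySem.Str.isIn "_QC" var_name || PySem.Str.isIn "FLAG" var_name then
      categories.modify "quality_flags" [] (· ++ [var_name])
    else if ["PLATFORM_NUMBER", "PROJECT_NAME", "PI_NAME", "CYCLE_NUMBER"].contains var_name then
      categories.modify "metadata" [] (· ++ [var_name])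
    else
      categories.modify "technical" [] (· ++ [var_name])) categories
  categories.items

-- ===== PORT B =====
def pvNameToCat : PySem.Dict String String := PySem.Dict.ofList
  [("LATITUDE", "coordinates"), ("LONGITUDE", "coordinates"), ("JULD", "coordinates"), ("PRES", "coordinates"),
   ("TEMP", "core_parameters"), ("PSAL", "core_parameters"), ("CNDC", "core_parameters"),
   ("DOXY", "bgc_parameters"), ("CHLA", "bgc_parameters"), ("BBP700", "bgc_parameters"),
   ("PH_IN_SITU_TOTAL", "bgc_parameters"), ("NITRATE", "bgc_parameters"),
   ("PLATFORM_NUMBER", "metadata"), ("PROJECT_NAME", "metadata"), ("PI_NAME", "metadata"), ("CYCLE_NUMBER", "metadata")]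

def pvOrder : List String := ["coordinates", "core_parameters", "bgc_parameters", "quality_flags", "metadata", "technical"]

def pvCategoryOf (name : String) : String :=
  match pvNameToCat.get? name with
  | some cat => cat
  | none => if PySem.Str.isIn "_QC" name || PySem.Str.isIn "FLAG" name then "quality_flags" else "technical"

def categorize_variables_py_alt (variables_info : List (String × String)) : List (String × List String) :=
  let names := variables_info.map (·.1)
  pvOrder.map (fun cat => (cat, names.filter (fun n => pvCategoryOf n == cat)))

-- ===== PRECONDITION & SPEC =====
def Spec_categorize_variables_py (variables_info : List (String × String)) (out : List (String × List String)) : Prop := out = categorize_variables_py_alt variables_info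
instance (variables_info : List (String × String)) (out : List (String × List String)) : Decidable (Spec_categorize_variables_py variables_info out) := by unfold Spec_categorize_variables_py; infer_instance

-- ===== CLAIM (what is proved, stated in full; the proofs are below) =====
def Claim_equal_categorize_variables_py : Prop := ∀ (variables_info : List (String × String)), Dom_categorize_variables_py variables_info → Spec_categorize_variables_py variables_info (categorize_variables_py variables_info)

-- ===== LEMMAS AND PROOFS =====

-- A's branch chain as a name → category function (proof helper only)
def pvClassifyA (var_name : String) : String :=
  if ["LATITUDE", "LONGITUDE", "JULD", "PRES"].contains var_name then "coordinates"
  else if ["TEMP", "PSAL", "CNDC"].contains var_name then "core_parameters"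
  else if ["DOXY", "CHLA", "BBP700", "PH_IN_SITU_TOTAL", "NITRATE"].contains var_name then "bgc_parameters"
  else if PySem.Str.isIn "_QC" var_name || PySem.Str.isIn "FLAG" var_name then "quality_flags"
  else if ["PLATFORM_NUMBER", "PROJECT_NAME", "PI_NAME", "CYCLE_NUMBER"].contains var_name then "metadata"
  else "technical"

def pvInit : PySem.Dict String (List String) :=
  (((((PySem.Dict.empty.insert "coordinates" []).insert "core_parameters" []).insert "bgc_parameters" []).insert "quality_flags" []).insert "metadata" []).insert "technical" []

lemma pvClassifyA_mem (s : String) : pvClassifyA s ∈ pvOrder := by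
  unfold pvClassifyA pvOrder; split_ifs <;> simp

lemma pvClassify_agree (s : String) : pvClassifyA s = pvCategoryOf s := by
  by_cases h0 : s = "LATITUDE"
  · subst h0; decide
  by_cases h1 : s = "LONGITUDE"
  · subst h1; decide
  by_cases h2 : s = "JULD"
  · subst h2; decide
  by_cases h3 : s = "PRES"
  · subst h3; decide
  by_cases h4 : s = "TEMP"
  · subst h4; decide
  by_cases h5 : s = "PSAL"
  · subst h5; decide
  by_cases h6 : s = "CNDC"
  · subst h6; decide
  by_cases h7 : s = "DOXY"
  · subst h7; decide
  by_cases h8 : s = "CHLA"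
  · subst h8; decide
  by_cases h9 : s = "BBP700"
  · subst h9; decide
  by_cases h10 : s = "PH_IN_SITU_TOTAL"
  · subst h10; decide
  by_cases h11 : s = "NITRATE"
  · subst h11; decide
  by_cases h12 : s = "PLATFORM_NUMBER"
  · subst h12; decide
  by_cases h13 : s = "PROJECT_NAME"
  · subst h13; decide
  by_cases h14 : s = "PI_NAME"
  · subst h14; decide
  by_cases h15 : s = "CYCLE_NUMBER"
  · subst h15; decide
  have hnone : pvNameToCat.get? s = none := by
    have : pvNameToCat = PySem.Dict.mk [("LATITUDE", "coordinates"), ("LONGITUDE", "coordinates"), ("JULD", "coordinates"), ("PRES", "coordinates"), ("TEMP", "core_parameters"), ("PSAL", "core_parameters"), ("CNDC", "core_parameters"), ("DOXY", "bgc_parameters"), ("CHLA", "bgc_parameters"), ("BBP700", "bgc_parameters"), ("PH_IN_SITU_TOTAL", "bgc_parameters"), ("NITRATE", "bgc_parameters"), ("PLATFORM_NUMBER", "metadata"), ("PROJECT_NAME", "metadata"), ("PI_NAME", "metadata"), ("CYCLE_NUMBER", "metadata")] := by decide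
    rw [this]
    simp [PySem.Dict.get?, Ne.symm h0, Ne.symm h1, Ne.symm h2, Ne.symm h3, Ne.symm h4, Ne.symm h5, Ne.symm h6, Ne.symm h7, Ne.symm h8, Ne.symm h9, Ne.symm h10, Ne.symm h11, Ne.symm h12, Ne.symm h13, Ne.symm h14, Ne.symm h15]
  simp only [pvClassifyA, pvCategoryOf, hnone]
  simp [List.contains_eq_mem, h0, h1, h2, h3, h4, h5, h6, h7, h8, h9, h10, h11, h12, h13, h14, h15]


lemma pvA_eq (variables_info : List (String × String)) :
    categorize_variables_py variables_info =
      ((variables_info.map (fun p => (pvClassifyA p.1, p.1))).foldl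
        (fun d q => d.modify q.1 [] (· ++ [q.2])) pvInit).items := by
  have hstep : (fun (categories : PySem.Dict String (List String)) (p : String × String) =>
      let var_name := p.1
      if ["LATITUDE", "LONGITUDE", "JULD", "PRES"].contains var_name then
        categories.modify "coordinates" [] (· ++ [var_name])
      else if ["TEMP", "PSAL", "CNDC"].contains var_name then
        categories.modify "core_parameters" [] (· ++ [var_name])
      else if ["DOXY", "CHLA", "BBP700", "PH_IN_SITU_TOTAL", "NITRATE"].contains var_name then
        categories.modify "bgc_parameters" [] (· ++ [var_name])
      else if PySem.Str.isIn "_QC" var_name || PySem.Str.isIn "FLAG" var_name then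
        categories.modify "quality_flags" [] (· ++ [var_name])
      else if ["PLATFORM_NUMBER", "PROJECT_NAME", "PI_NAME", "CYCLE_NUMBER"].contains var_name then
        categories.modify "metadata" [] (· ++ [var_name])
      else
        categories.modify "technical" [] (· ++ [var_name]))
      = fun d p => d.modify (pvClassifyA p.1) [] (· ++ [p.1]) := by
    funext d p
    simp only [pvClassifyA]
    split_ifs <;> rfl
  simp only [categorize_variables_py, List.foldl_map, hstep, pvInit]

theorem categorize_variables_py_spec' (variables_info : List (String × String)) :
    categorize_variables_py variables_info = categorize_variables_py_alt variables_info := by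
  rw [pvA_eq]
  set l := variables_info.map (fun p => (pvClassifyA p.1, p.1)) with hl
  set final := l.foldl (fun d q => d.modify q.1 [] (· ++ [q.2])) pvInit with hfinal
  have hkinit : pvInit.keys = pvOrder := by decide
  have hkeys : final.keys = pvOrder := by
    rw [hfinal, PySem.Dict.keys_foldl_modify_key (key := Prod.fst), hkinit,
        PySem.Set.update_eq_append_filter]
    have hnil : (PySem.Set.ofList (l.map Prod.fst)).filter (fun y => !(PySem.Set.contains pvOrder y)) = [] := by
      rw [List.filter_eq_nil_iff]
      intro y hy
      have hy' : y ∈ l.map Prod.fst := (PySem.Set.mem_ofList _ _).mp hy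
      simp only [hl, List.map_map, List.mem_map] at hy'
      obtain ⟨p, _, rfl⟩ := hy'
      simp [pvClassifyA_mem]
    rw [hnil, List.append_nil]
  have hnd : final.keys.Nodup := by rw [hkeys]; decide
  rw [PySem.Dict.items_eq_map_keys final hnd [], hkeys]
  simp only [categorize_variables_py_alt]
  apply List.map_congr_left
  intro c hc
  have hg : final.getD c [] = pvInit.getD c [] ++ (l.filter (fun q => q.1 == c)).map (·.2) :=
    PySem.Dict.getD_foldl_modify_append l pvInit c
  have hinit0 : pvInit.getD c [] = [] := by
    fin_cases hc <;> decide
  rw [hg, hinit0, List.nil_append]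
  simp only [hl, List.filter_map, List.map_map, Prod.mk.injEq, true_and]
  congr 1
  apply List.filter_congr
  intro p _
  simp [pvClassify_agree]


-- ===== VERDICT (by name: the statement is the Claim_ definition above) =====
theorem categorize_variables_py_spec : Claim_equal_categorize_variables_py := by
  intro vi _
  exact categorize_variables_py_spec' vi
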